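-- pv_equiv track=rewrite | github.com/Paciolus/Paciolus | backend/billing/price_config.py | calculate_additional_seats_cost
-- ===== SOURCE A (Python) =====
-- SEAT_PRICE_TIERS: list[tuple[int, int, dict[str, int]]] = [
--     # (min_seat, max_seat, {interval: price_cents_per_seat})
--     (4, 10, {"monthly": 8000, "annual": 80000}),  # $80/mo, $800/yr per seat
--     (11, 25, {"monthly": 7000, "annual": 70000}),  # $70/mo, $700/yr per seat
--     # 26+ = contact sales (not purchasable via self-serve)
-- ]
--
-- def get_seat_price_cents(seat_number: int, interval: str = "monthly") -> int | None:
--     """Get the per-seat price in cents for a given seat position.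
--
--     Seats 1-3 are included in the base plan (returns 0).
--     Seats 4-25 are tiered add-ons (returns per-seat price).
--     Seats 26+ require sales contact (returns None).
--     """
--     if seat_number <= 3:
--         return 0  # Included in base plan
--     for min_seat, max_seat, prices in SEAT_PRICE_TIERS:
--         if min_seat <= seat_number <= max_seat:
--             return prices.get(interval, 0)
--     return None  # Beyond self-serve — contact sales
--
-- def calculate_additional_seats_cost(additional_seats: int, interval: str = "monthly") -> int | None:
--     """Calculate total cost for a number of additional seats (above the base 3).
--
--     Returns total cost in cents, or None if any seat exceeds self-serve limit.
--     Each seat is priced at its tier rate (not blended).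
--     """
--     if additional_seats <= 0:
--         return 0
--     total = 0
--     for i in range(additional_seats):
--         seat_number = 4 + i  # First add-on seat is seat #4
--         price = get_seat_price_cents(seat_number, interval)
--         if price is None:
--             return None  # Exceeds self-serve limit
--         total += price
--     return total
-- ===== SOURCE B (Python) =====
-- SEAT_PRICE_TIERS: list[tuple[int, int, dict[str, int]]] = [
--     (4, 10, {"monthly": 8000, "annual": 80000}),
--     (11, 25, {"monthly": 7000, "annual": 70000}),
-- ]
--
-- def calculate_additional_seats_cost(additional_seats: int, interval: str = "monthly") -> int | None:
--     if additional_seats <= 0: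
--         return 0
--     last_seat = 3 + additional_seats
--     if last_seat > 25:
--         return None  # beyond self-serve limit
--     total = 0
--     for min_seat, max_seat, prices in SEAT_PRICE_TIERS:
--         count = min(last_seat, max_seat) - max(4, min_seat) + 1
--         if count > 0:
--             total += count * prices.get(interval, 0)
--     return total
-- ===== Notes on version B (the rewrite author's own statement) =====
-- stated objective: alternative
-- what changed: Replaces the per-seat loop (one tier scan per requested seat) by a single arithmetic pass over the two tiers: each tier's overlap count with the requested seat range times its price.
import Mathlib
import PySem

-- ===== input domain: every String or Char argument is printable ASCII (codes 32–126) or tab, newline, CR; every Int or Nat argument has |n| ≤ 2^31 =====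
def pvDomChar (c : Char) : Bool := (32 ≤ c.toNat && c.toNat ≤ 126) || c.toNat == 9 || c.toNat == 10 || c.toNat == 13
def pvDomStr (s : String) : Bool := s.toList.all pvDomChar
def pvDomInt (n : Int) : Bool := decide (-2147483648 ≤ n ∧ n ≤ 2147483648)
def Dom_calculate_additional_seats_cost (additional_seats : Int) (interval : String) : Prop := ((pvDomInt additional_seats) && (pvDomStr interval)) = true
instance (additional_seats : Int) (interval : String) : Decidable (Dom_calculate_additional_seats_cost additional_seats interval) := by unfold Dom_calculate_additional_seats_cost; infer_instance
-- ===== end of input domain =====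

-- B replaces A's per-seat loop by one arithmetic pass over the two price tiers (overlap count × tier price); return value equivalence is proved for all inputs.

-- ===== PORT A =====
def seatTiers : List (Int × Int × PySem.Dict String Int) :=
  [(4, 10, PySem.Dict.ofList [("monthly", 8000), ("annual", 80000)]),
   (11, 25, PySem.Dict.ofList [("monthly", 7000), ("annual", 70000)])]

def gspLoop (seat : Int) (interval : String) : List (Int × Int × PySem.Dict String Int) → Option Int
  | [] => none
  | (mn, mx, prices) :: rest =>
      if mn ≤ seat ∧ seat ≤ mx then some (prices.getD interval 0)
      else gspLoop seat interval rest

def get_seat_price_cents (seat : Int) (interval : String) : Option Int :=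
  if seat ≤ 3 then some 0 else gspLoop seat interval seatTiers

-- 'for i in range(additional_seats)' is ported as fuel-counter recursion over i = 0,1,2,…
-- (range is a lazy iterator in Python; the early 'return None' stops the loop), same state (total), same order.
def aLoop (interval : String) (total : Int) (i : Int) : Nat → Option Int
  | 0 => some total
  | fuel + 1 =>
      match get_seat_price_cents (4 + i) interval with
      | none => none
      | some price => aLoop interval (total + price) (i + 1) fuel

def calculate_additional_seats_cost (additional_seats : Int) (interval : String) : Option Int :=
  if additional_seats ≤ 0 then some 0
  else aLoop interval 0 0 additional_seats.toNat

-- ===== PORT B =====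
def calculate_additional_seats_cost_alt (additional_seats : Int) (interval : String) : Option Int :=
  if additional_seats ≤ 0 then some 0
  else
    let last_seat := 3 + additional_seats
    if last_seat > 25 then none
    else some (seatTiers.foldl (fun total t =>
      let count := min last_seat t.2.1 - max 4 t.1 + 1
      if count > 0 then total + count * t.2.2.getD interval 0 else total) 0)

-- ===== PRECONDITION & SPEC =====
def Spec_calculate_additional_seats_cost (additional_seats : Int) (interval : String) (out : Option Int) : Prop := out = calculate_additional_seats_cost_alt additional_seats interval
instance (additional_seats : Int) (interval : String) (out : Option Int) : Decidable (Spec_calculate_additional_seats_cost additional_seats interval out) := by unfold Spec_calculate_additional_seats_cost; infer_instance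

-- ===== CLAIM (what is proved, stated in full; the proofs are below) =====
def Claim_equal_calculate_additional_seats_cost : Prop := ∀ (additional_seats : Int) (interval : String), Dom_calculate_additional_seats_cost additional_seats interval → Spec_calculate_additional_seats_cost additional_seats interval (calculate_additional_seats_cost additional_seats interval)

-- ===== LEMMAS AND PROOFS =====

def tier1Price (interval : String) : Int :=
  (PySem.Dict.ofList [("monthly", (8000 : Int)), ("annual", 80000)]).getD interval 0

def tier2Price (interval : String) : Int :=
  (PySem.Dict.ofList [("monthly", (7000 : Int)), ("annual", 70000)]).getD interval 0

lemma gsp_t1 (i : Int) (interval : String) (h1 : 0 ≤ i) (h2 : i ≤ 6) :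
    get_seat_price_cents (4 + i) interval = some (tier1Price interval) := by
  simp only [get_seat_price_cents, seatTiers, gspLoop, tier1Price]
  rw [if_neg (by omega), if_pos (by omega)]

lemma gsp_t2 (i : Int) (interval : String) (h1 : 7 ≤ i) (h2 : i ≤ 21) :
    get_seat_price_cents (4 + i) interval = some (tier2Price interval) := by
  simp only [get_seat_price_cents, seatTiers, gspLoop, tier2Price]
  rw [if_neg (by omega), if_neg (by omega), if_pos (by omega)]

lemma gsp_none (interval : String) : get_seat_price_cents 26 interval = none := by
  simp only [get_seat_price_cents, seatTiers, gspLoop]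
  rw [if_neg (by omega), if_neg (by omega), if_neg (by omega)]

lemma aLoop_sum (interval : String) (n : Int) (hn : n ≤ 22) :
    ∀ k : Nat, ∀ i : Int, i = n - (k : Int) → 0 ≤ i → ∀ t : Int,
      aLoop interval t i k =
      some (t + (max 0 (min n 7 - i)) * tier1Price interval
              + (max 0 (min n 22 - max i 7)) * tier2Price interval) := by
  intro k
  induction k with
  | zero =>
    intro i hi _ t
    have hin : i = n := by omega
    subst hin
    simp [aLoop]
  | succ k ih =>
    intro i hi h0 t
    by_cases h6 : i ≤ 6
    · rw [show aLoop interval t i (k + 1) =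
            aLoop interval (t + tier1Price interval) (i + 1) k by
          simp [aLoop, gsp_t1 i interval h0 h6]]
      rw [ih (i + 1) (by omega) (by omega) (t + tier1Price interval)]
      have e1 : max 0 (min n 7 - i) = max 0 (min n 7 - (i + 1)) + 1 := by omega
      have e2 : max (i + 1) 7 = max i 7 := by omega
      rw [e1, e2]; ring_nf
    · rw [show aLoop interval t i (k + 1) =
            aLoop interval (t + tier2Price interval) (i + 1) k by
          simp [aLoop, gsp_t2 i interval (by omega) (by omega)]]
      rw [ih (i + 1) (by omega) (by omega) (t + tier2Price interval)]
      have e1 : max 0 (min n 7 - (i + 1)) = max 0 (min n 7 - i) := by omega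
      have e2 : max 0 (min n 22 - max i 7) = max 0 (min n 22 - max (i + 1) 7) + 1 := by omega
      rw [e1, e2]; ring_nf
    
lemma aLoop_none (interval : String) :
    ∀ k : Nat, k ≤ 22 → ∀ fuel : Nat, 23 ≤ 22 - (k : Int) + (fuel : Int) →
      ∀ total, aLoop interval total (22 - (k : Int)) fuel = none := by
  intro k
  induction k with
  | zero =>
    intro _ fuel hfuel total
    obtain ⟨f, rfl⟩ : ∃ f, fuel = f + 1 := ⟨fuel - 1, by omega⟩
    have h26 : get_seat_price_cents (4 + ((22 : Int) - (0 : Nat))) interval = none := by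
      norm_num [gsp_none interval]
    simp only [aLoop, h26]
  | succ k ih =>
    intro hk fuel hfuel total
    obtain ⟨f, rfl⟩ : ∃ f, fuel = f + 1 := ⟨fuel - 1, by omega⟩
    have hstep : (22 : Int) - ((k : Int) + 1) + 1 = 22 - (k : Int) := by omega
    by_cases h6 : 22 - ((k : Int) + 1) ≤ 6
    · have hp := gsp_t1 (22 - ((k : Int) + 1)) interval (by omega) h6
      simp only [aLoop, Nat.cast_add, Nat.cast_one, hp, hstep]
      exact ih (by omega) f (by push_cast at hfuel ⊢; omega) _
    · have hp := gsp_t2 (22 - ((k : Int) + 1)) interval (by omega) (by omega)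
      simp only [aLoop, Nat.cast_add, Nat.cast_one, hp, hstep]
      exact ih (by omega) f (by push_cast at hfuel ⊢; omega) _

-- ===== VERDICT (by name: the statement is the Claim_ definition above) =====
theorem calculate_additional_seats_cost_spec : Claim_equal_calculate_additional_seats_cost := by
  intro n interval _
  unfold Spec_calculate_additional_seats_cost
  by_cases h0 : n ≤ 0
  · simp [calculate_additional_seats_cost, calculate_additional_seats_cost_alt, h0]
  · by_cases hbig : 22 < n
    · have hA := aLoop_none interval 22 le_rfl n.toNat (by push_cast; omega) 0
      norm_num at hA
      simp [calculate_additional_seats_cost, calculate_additional_seats_cost_alt, h0, hA,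
        show (25 : Int) < 3 + n from by omega]
    · have hA := aLoop_sum interval n (by omega) n.toNat 0 (by omega) le_rfl 0
      simp only [calculate_additional_seats_cost, calculate_additional_seats_cost_alt,
        if_neg h0, seatTiers, List.foldl, hA]
      rw [if_neg (show ¬(3 + n > 25) by omega)]
      have f1 : max 0 (min n 7 - 0) = min n 7 := by omega
      have f2 : max 0 (min n 22 - max 0 7) = max 0 (n - 7) := by omega
      rw [f1, f2]
      by_cases h7 : 7 < n
      · rw [if_pos (show min (3 + n) 25 - max 4 11 + 1 > 0 by omega),
            if_pos (show min (3 + n) 10 - max 4 4 + 1 > 0 by omega)]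
        refine congrArg some ?_
        simp only [tier1Price, tier2Price]
        rw [show min (3 + n) 10 - max 4 4 + 1 = min n 7 by omega,
            show min (3 + n) 25 - max 4 11 + 1 = n - 7 by omega,
            show max 0 (n - 7) = n - 7 by omega]
        try ring
      · rw [if_neg (show ¬(min (3 + n) 25 - max 4 11 + 1 > 0) by omega),
            if_pos (show min (3 + n) 10 - max 4 4 + 1 > 0 by omega)]
        refine congrArg some ?_
        simp only [tier1Price, tier2Price]
        rw [show min (3 + n) 10 - max 4 4 + 1 = min n 7 by omega,
            show max 0 (n - 7) = 0 by omega]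
        ring
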